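-- pv_equiv track=rewrite | github.com/BCSZSZ/J-stock | src/analysis/macd_segment_analysis.py | normalize_ticker_inputs
-- ===== SOURCE A (Python) =====
-- from typing import Any, Dict, Iterable, Optional, Sequence
--
-- def normalize_ticker_inputs(
--     tickers: Optional[Sequence[str]] = None,
--     tickers_csv: Optional[str] = None,
-- ) -> list[str]:
--     values: list[str] = []
--     seen: set[str] = set()
--
--     def _add(raw_value: str) -> None:
--         value = str(raw_value).strip().upper()
--         if not value:
--             return
--         if value.endswith(".T"):
--             value = value[:-2]
--         if value and value not in seen:
--             seen.add(value)
--             values.append(value)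
--
--     for ticker in tickers or []:
--         _add(ticker)
--
--     if tickers_csv:
--         for ticker in tickers_csv.split(","):
--             _add(ticker)
--
--     return values
-- ===== SOURCE B (Python) =====
-- from typing import Optional, Sequence
--
--
-- def _clean(raw_value: str) -> str:
--     value = str(raw_value).strip().upper()
--     if value.endswith(".T"):
--         value = value[:-2]
--     return value
--
--
-- def _nub(xs: list[str]) -> list[str]:
--     # filter-nub: repeatedly take the head and remove all its copies from the rest
--     out: list[str] = []
--     while xs:
--         head = xs[0]
--         out.append(head)
--         xs = [y for y in xs[1:] if y != head]
--     return out
--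
--
-- def normalize_ticker_inputs(
--     tickers: Optional[Sequence[str]] = None,
--     tickers_csv: Optional[str] = None,
-- ) -> list[str]:
--     tokens = list(tickers or [])
--     if tickers_csv:
--         tokens += tickers_csv.split(",")
--     cleaned = [v for v in (_clean(t) for t in tokens) if v]
--     return _nub(cleaned)
-- ===== Notes on version B (the rewrite author's own statement) =====
-- stated objective: alternative
-- what changed: Replaces A's single interleaved pass with a mutable seen-set by a two-stage pipeline: clean-and-filter all tokens first, then deduplicate with a recursive filter-nub (take the head, filter its copies out of the tail, recurse) that uses no auxiliary set or dict at all.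
import Mathlib
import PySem

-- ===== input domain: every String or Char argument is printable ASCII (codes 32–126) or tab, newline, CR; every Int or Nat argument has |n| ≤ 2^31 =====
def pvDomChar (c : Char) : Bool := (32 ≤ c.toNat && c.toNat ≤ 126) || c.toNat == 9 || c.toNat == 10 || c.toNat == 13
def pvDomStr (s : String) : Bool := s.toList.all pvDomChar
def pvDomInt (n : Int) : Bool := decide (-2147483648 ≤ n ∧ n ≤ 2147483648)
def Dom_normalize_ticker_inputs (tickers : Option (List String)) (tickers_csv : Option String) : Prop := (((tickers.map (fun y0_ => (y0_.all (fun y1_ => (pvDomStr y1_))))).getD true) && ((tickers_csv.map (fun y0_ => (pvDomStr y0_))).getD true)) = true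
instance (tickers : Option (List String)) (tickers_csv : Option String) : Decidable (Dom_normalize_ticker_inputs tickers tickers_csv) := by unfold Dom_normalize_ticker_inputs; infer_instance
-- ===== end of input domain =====

-- B replaces A's single interleaved pass with a mutable seen-set by a two-stage pipeline:
-- clean/filter all tokens, then deduplicate with a recursive filter-nub (no set/dict); same result, alternative algorithm.


-- ===== PORT A =====
-- A's _add: mutate (values, seen); here the state is threaded explicitly through a fold.
def pvAddA (st : List String × PySem.Set String) (raw_value : String) : List String × PySem.Set String :=
  let value := PySem.Str.upper (PySem.Str.strip raw_value)
  if value = "" then st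
  else
    let value := if PySem.Str.endswith value ".T" then PySem.Str.slice value none (some (-2)) else value
    if value ≠ "" ∧ PySem.Set.contains st.2 value = false then
      (st.1 ++ [value], PySem.Set.add st.2 value)
    else st

def normalize_ticker_inputs (tickers : Option (List String)) (tickers_csv : Option String) : List String :=
  let st : List String × PySem.Set String := ([], PySem.Set.empty)
  let st := (tickers.getD []).foldl pvAddA st
  let st :=
    match tickers_csv with
    | some s => if s ≠ "" then ((PySem.Str.split? s ",").getD []).foldl pvAddA st else st
    | none => st
  st.1

-- ===== PORT B =====
-- B's pure transform _clean
def pvCleanB (raw_value : String) : String :=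
  let value := PySem.Str.upper (PySem.Str.strip raw_value)
  if PySem.Str.endswith value ".T" then PySem.Str.slice value none (some (-2)) else value

-- B's _nub loop: state (out, xs); take the head, append it, filter its copies from the rest
def pvNub (out : List String) : List String → List String
  | [] => out
  | head :: rest => pvNub (out ++ [head]) (rest.filter (fun y => y ≠ head))
termination_by xs => xs.length
decreasing_by simpa using le_trans (List.length_filter_le _ _) (Nat.le_of_eq List.length_attach)

def normalize_ticker_inputs_alt (tickers : Option (List String)) (tickers_csv : Option String) : List String :=
  let tokens := tickers.getD []
  let tokens :=
    match tickers_csv with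
    | some s => if s ≠ "" then tokens ++ (PySem.Str.split? s ",").getD [] else tokens
    | none => tokens
  let cleaned := (tokens.map pvCleanB).filter (fun v => v ≠ "")
  pvNub [] cleaned

-- ===== PRECONDITION & SPEC =====
def Spec_normalize_ticker_inputs (tickers : Option (List String)) (tickers_csv : Option String) (out : List String) : Prop := out = normalize_ticker_inputs_alt tickers tickers_csv
instance (tickers : Option (List String)) (tickers_csv : Option String) (out : List String) : Decidable (Spec_normalize_ticker_inputs tickers tickers_csv out) := by unfold Spec_normalize_ticker_inputs; infer_instance

-- ===== CLAIM (what is proved, stated in full; the proofs are below) =====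
def Claim_equal_normalize_ticker_inputs : Prop := ∀ (tickers : Option (List String)) (tickers_csv : Option String), Dom_normalize_ticker_inputs tickers tickers_csv → Spec_normalize_ticker_inputs tickers tickers_csv (normalize_ticker_inputs tickers tickers_csv)

-- ===== LEMMAS AND PROOFS =====

-- One step of A from a diagonal state (vs, vs) is: skip empty cleans, else Set.add of the clean value.
lemma pvAddA_diag (vs : PySem.Set String) (raw : String) :
    pvAddA (vs, vs) raw =
      (if pvCleanB raw = "" then (vs, vs) else (PySem.Set.add vs (pvCleanB raw), PySem.Set.add vs (pvCleanB raw))) := by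
  unfold pvAddA pvCleanB
  by_cases h0 : PySem.Str.upper (PySem.Str.strip raw) = ""
  · simp [h0, show PySem.Chars.endswith ([] : List Char) ['.', 'T'] = false from by decide]
  · simp only [if_neg h0]
    set v := if PySem.Str.endswith (PySem.Str.upper (PySem.Str.strip raw)) ".T"
             then PySem.Str.slice (PySem.Str.upper (PySem.Str.strip raw)) none (some (-2))
             else PySem.Str.upper (PySem.Str.strip raw) with hv
    by_cases hve : v = ""
    · simp [hve]
    · by_cases hc : PySem.Set.contains vs v = false
      · have hm : v ∉ vs := by simpa using hc
        rw [if_pos ⟨hve, hc⟩, if_neg hve, PySem.Set.add_of_not_mem hm]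
      · have hc' : PySem.Set.contains vs v = true := by
          revert hc; cases PySem.Set.contains vs v <;> simp
        have hm : v ∈ vs := (PySem.Set.contains_iff _ _).mp hc'
        rw [if_neg (fun h => by rw [h.2] at hc'; exact absurd hc' (by decide)), if_neg hve,
          PySem.Set.add_of_mem hm]

-- Folding A's _add from a diagonal state is the fold of Set.add over the cleaned, filtered elements.
lemma foldl_pvAddA_diag (L : List String) (vs : PySem.Set String) :
    L.foldl pvAddA (vs, vs) =
      (((L.map pvCleanB).filter (fun v => v ≠ "")).foldl PySem.Set.add vs,
       ((L.map pvCleanB).filter (fun v => v ≠ "")).foldl PySem.Set.add vs) := by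
  induction L generalizing vs with
  | nil => simp
  | cons x xs ih =>
    simp only [List.foldl_cons, List.map_cons]
    rw [pvAddA_diag]
    by_cases h : pvCleanB x = ""
    · simp [h, ih]
    · simp [h, ih]

-- Set.discard is a filter.
lemma pv_discard_eq_filter (s : List String) (x : String) :
    PySem.Set.discard s x = s.filter (fun y => y ≠ x) := by
  simp only [PySem.Set.discard]
  apply List.filter_congr
  intro a _
  by_cases h : a = x
  · simp [h]
  · simp [h]

-- set() of a filtered list is the filtered set (first occurrences survive filtering).
lemma pv_ofList_filter (p : String → Bool) (xs : List String) :
    PySem.Set.ofList (xs.filter p) = (PySem.Set.ofList xs).filter p := by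
  induction xs with
  | nil => simp
  | cons y ys ih =>
    by_cases hp : p y = true
    · rw [List.filter_cons_of_pos hp, PySem.Set.ofList_cons, PySem.Set.ofList_cons,
        pv_discard_eq_filter, pv_discard_eq_filter, ih, List.filter_cons_of_pos hp,
        List.filter_filter, List.filter_filter]
      congr 1
      apply List.filter_congr
      intro a _
      exact Bool.and_comm _ _
    · have hp' : p y = false := by simpa using hp
      rw [List.filter_cons_of_neg (by simp [hp']), ih, PySem.Set.ofList_cons,
        List.filter_cons_of_neg (by simp [hp']), pv_discard_eq_filter, List.filter_filter]
      apply List.filter_congr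
      intro a _
      by_cases h : a = y
      · simp [h, hp']
      · simp [h]

-- The filter-nub loop computes set()'s first-occurrence order, i.e. ordered dedup.
lemma pvNub_eq_ofList_aux : ∀ (n : Nat) (out xs : List String), xs.length ≤ n → pvNub out xs = out ++ PySem.Set.ofList xs := by
  intro n
  induction n with
  | zero =>
    intro out xs h
    rw [List.length_eq_zero_iff.mp (Nat.le_zero.mp h)]
    simp [pvNub]
  | succ n ih =>
    intro out xs h
    cases xs with
    | nil => simp [pvNub]
    | cons x xs =>
      rw [show pvNub out (x :: xs) = pvNub (out ++ [x]) (xs.filter (fun y => y ≠ x)) from by simp [pvNub],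
        ih _ _ (le_trans (List.length_filter_le _ _) (Nat.succ_le_succ_iff.mp h)),
        pv_ofList_filter, PySem.Set.ofList_cons, pv_discard_eq_filter]
      simp

lemma pvNub_eq_ofList (xs : List String) : pvNub [] xs = PySem.Set.ofList xs := by
  simpa using pvNub_eq_ofList_aux xs.length [] xs le_rfl

-- ===== VERDICT (by name: the statement is the Claim_ definition above) =====
theorem normalize_ticker_inputs_spec : Claim_equal_normalize_ticker_inputs := by
  intro tickers tickers_csv _
  unfold Spec_normalize_ticker_inputs normalize_ticker_inputs normalize_ticker_inputs_alt
  have key : ∀ (L1 L2 : List String),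
      (L2.foldl pvAddA (L1.foldl pvAddA ([], PySem.Set.empty))).1
        = pvNub [] (((L1 ++ L2).map pvCleanB).filter (fun v => v ≠ "")) := by
    intro L1 L2
    rw [pvNub_eq_ofList,
      show (([], PySem.Set.empty) : List String × PySem.Set String)
          = ((PySem.Set.empty : PySem.Set String), (PySem.Set.empty : PySem.Set String)) from rfl]
    rw [foldl_pvAddA_diag, foldl_pvAddA_diag, PySem.Set.ofList_eq_foldl]
    simp [List.filter_append, List.foldl_append, PySem.Set.empty]
  cases tickers_csv with
  | none => simpa using key (tickers.getD []) []
  | some s =>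
    by_cases hs : s = ""
    · simpa [hs] using key (tickers.getD []) []
    · simpa [hs] using key (tickers.getD []) ((PySem.Str.split? s ",").getD [])
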